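-- pv_equiv track=rewrite | github.com/sungyujeon/problem-solving | others/naver/1.py | solution
-- ===== SOURCE A (Python) =====
-- def solution(lottery):
--     tries = [0] * 1001
--     winners = set()
--
--     for user, isWin in lottery:
--         if user not in winners:
--             tries[user] += 1
--
--             if isWin:
--                 winners.add(user)
--
--     if not winners:
--         return 0
--     else:
--         total = 0
--         for winner in winners:
--             total += tries[winner]
--
--         res = total // len(winners)
--         return res
-- ===== SOURCE B (Python) =====
-- def solution(lottery):
--     groups = {}
--     for user, isWin in lottery:
--         groups.setdefault(user, []).append(isWin)
--     counts = []
--     for flags in groups.values():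
--         for i, f in enumerate(flags):
--             if f:
--                 counts.append(i + 1)
--                 break
--     if not counts:
--         return 0
--     return sum(counts) // len(counts)
-- ===== Notes on version B (the rewrite author's own statement) =====
-- stated objective: alternative
-- what changed: Replaces A's fixed 1001-slot tries array plus global winners set by a group-by-user dict of win-flag lists with a per-user first-win scan, so user ids are real dict keys instead of array indices.
-- outside the precondition, e.g. on solution([(-1, False), (1000, True)]): A returns 2, B returns 1; on solution([(-1, True), (1000, False), (1000, True)]): A returns 3, B returns 1
import Mathlib
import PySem

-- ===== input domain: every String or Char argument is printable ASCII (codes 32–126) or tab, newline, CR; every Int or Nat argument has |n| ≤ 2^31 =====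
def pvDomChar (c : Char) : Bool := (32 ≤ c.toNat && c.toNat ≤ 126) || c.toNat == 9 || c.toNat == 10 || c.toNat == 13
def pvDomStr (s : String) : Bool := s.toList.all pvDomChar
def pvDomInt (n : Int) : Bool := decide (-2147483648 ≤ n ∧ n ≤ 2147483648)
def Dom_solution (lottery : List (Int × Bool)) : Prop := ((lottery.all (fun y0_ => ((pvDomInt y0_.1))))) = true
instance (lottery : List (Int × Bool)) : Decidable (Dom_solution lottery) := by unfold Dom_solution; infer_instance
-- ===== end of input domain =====

-- B groups the entries per user (dict of win-flag lists) and scans each group for its first win,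
-- instead of A's fixed 1001-slot tries array plus a global winners set: an alternative decomposition,
-- not claimed faster; neither program mutates its argument.

-- ===== PORT A =====
def solution (lottery : List (Int × Bool)) : Int :=
  -- tries = [0] * 1001 ; winners = set()
  let st := lottery.foldl
    (fun (st : List Int × PySem.Set Int) (p : Int × Bool) =>
      if PySem.Set.contains st.2 p.1 then st      -- 'if user not in winners' (already a winner → skip)
      else
        -- tries[user] += 1 : pySetD/pyGetD follow Python's negative-index wrap; IndexError (user outside [-1001,1000]) is outside Pre_
        let tries := PySem.List.pySetD st.1 p.1 (PySem.List.pyGetD st.1 p.1 0 + 1)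
        if p.2 then (tries, PySem.Set.add st.2 p.1) else (tries, st.2))
    (List.replicate 1001 (0 : Int), PySem.Set.empty)
  if st.2 = [] then 0                            -- 'if not winners: return 0'
  else
    -- total = 0; for winner in winners: total += tries[winner]  (a sum over the set: order-independent)
    let total := st.2.foldl (fun tot w => tot + PySem.List.pyGetD st.1 w 0) 0
    PySem.Int.floordiv total (st.2.length : Int) -- res = total // len(winners)

-- ===== PORT B =====
-- inner loop 'for i, f in enumerate(flags): if f: counts.append(i+1); break'
def firstWinIdx : List Bool → Int → Option Int
  | [], _ => none
  | f :: rest, i => if f then some (i + 1) else firstWinIdx rest (i + 1)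

def solution_alt (lottery : List (Int × Bool)) : Int :=
  -- groups = {}; for user, isWin in lottery: groups.setdefault(user, []).append(isWin)
  let groups := lottery.foldl
    (fun (g : PySem.Dict Int (List Bool)) (p : Int × Bool) =>
      g.modify p.1 [] (fun fs => fs ++ [p.2])) PySem.Dict.empty
  -- counts = []; for flags in groups.values(): first win at i → append i+1, break
  let counts := (PySem.Dict.values groups).foldl
    (fun (acc : List Int) fs =>
      match firstWinIdx fs 0 with
      | some c => acc ++ [c]
      | none => acc) []
  if counts = [] then 0                          -- 'if not counts: return 0'
  else PySem.Int.floordiv counts.sum (counts.length : Int)  -- sum(counts) // len(counts)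

-- ===== PRECONDITION & SPEC =====
-- Pre_ excludes (a) inputs on which A raises IndexError (a user id outside [-1001, 1000]) and
-- (b) inputs that mention two user ids exactly 1001 apart one of which has a winning entry: there
-- A's 1001-slot array maps both ids to the same cell (Python's negative-index wraparound), so the
-- two users' try counts are conflated and A's average is an accident of the array size, while B
-- keeps the two users distinct.
def Pre_solution (lottery : List (Int × Bool)) : Prop :=
  (∀ p ∈ lottery, -1001 ≤ p.1 ∧ p.1 ≤ 1000) ∧
  ¬ (∃ p ∈ lottery, (∃ q ∈ lottery, q.1 = p.1 + 1001) ∧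
      ((p.1, true) ∈ lottery ∨ (p.1 + 1001, true) ∈ lottery))
instance (lottery : List (Int × Bool)) : Decidable (Pre_solution lottery) := by
  unfold Pre_solution; infer_instance
def pvWitness_solution : (List (Int × Bool)) := [(3, false), (3, true), (5, true)]

def Spec_solution (lottery : List (Int × Bool)) (out : Int) : Prop :=
  out = solution_alt lottery
instance (lottery : List (Int × Bool)) (out : Int) : Decidable (Spec_solution lottery out) := by
  unfold Spec_solution; infer_instance

-- ===== CLAIM (what is proved, stated in full; the proofs are below) =====
def Claim_equal_solution : Prop := ∀ (lottery : List (Int × Bool)), Dom_solution lottery → Pre_solution lottery → Spec_solution lottery (solution lottery)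

-- ===== LEMMAS AND PROOFS =====

-- the array cell Python's tries[u] addresses (negative u wraps; = PySem.List.pyIdx? 1001 u)
def cellA (u : Int) : Nat := if 0 ≤ u then u.toNat else 1001 - (-u).toNat

-- tries-until-first-win of user u (all of u's entries if u never wins)
def cntA (u : Int) : List (Int × Bool) → Int
  | [] => 0
  | p :: t => if p.1 = u then (if p.2 then 1 else 1 + cntA u t) else cntA u t

-- the win flags of user u, in entry order
def flagsB (u : Int) (l : List (Int × Bool)) : List Bool :=
  (l.filter (fun p => p.1 == u)).map (fun p => p.2)

-- A's loop body / loop, named for the proofs (definitionally the port's fold)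
def stepA (st : List Int × PySem.Set Int) (p : Int × Bool) : List Int × PySem.Set Int :=
  if PySem.Set.contains st.2 p.1 then st
  else
    let tries := PySem.List.pySetD st.1 p.1 (PySem.List.pyGetD st.1 p.1 0 + 1)
    if p.2 then (tries, PySem.Set.add st.2 p.1) else (tries, st.2)

def foldA (l : List (Int × Bool)) (st : List Int × PySem.Set Int) :
    List Int × PySem.Set Int := l.foldl stepA st

theorem solution_eq_foldA (l : List (Int × Bool)) :
    solution l =
      (if (foldA l (List.replicate 1001 (0 : Int), PySem.Set.empty)).2 = [] then 0
       else PySem.Int.floordiv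
         ((foldA l (List.replicate 1001 (0 : Int), PySem.Set.empty)).2.foldl
           (fun tot w => tot + PySem.List.pyGetD
             (foldA l (List.replicate 1001 (0 : Int), PySem.Set.empty)).1 w 0) 0)
         (((foldA l (List.replicate 1001 (0 : Int), PySem.Set.empty)).2.length : Int))) := rfl

theorem cellA_lt {u : Int} (h1 : -1001 ≤ u) (h2 : u ≤ 1000) : cellA u < 1001 := by
  unfold cellA; split <;> omega

theorem cellA_inj {u v : Int} (hu1 : -1001 ≤ u) (hu2 : u ≤ 1000)
    (hv1 : -1001 ≤ v) (hv2 : v ≤ 1000) (h : cellA u = cellA v) :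
    u = v ∨ u = v + 1001 ∨ v = u + 1001 := by
  unfold cellA at h; split at h <;> split at h <;> omega

theorem pyIdx?_1001 {u : Int} (h1 : -1001 ≤ u) (h2 : u ≤ 1000) :
    PySem.List.pyIdx? 1001 u = some (cellA u) := by
  unfold PySem.List.pyIdx? cellA
  split
  · split
    · rfl
    · omega
  · split
    · norm_num
    · omega

theorem pyGetD_cellA {ts : List Int} {u : Int} (hl : ts.length = 1001)
    (h1 : -1001 ≤ u) (h2 : u ≤ 1000) (d : Int) :
    PySem.List.pyGetD ts u d = ts.getD (cellA u) d := by
  unfold PySem.List.pyGetD PySem.List.pyGet?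
  rw [hl, pyIdx?_1001 h1 h2]
  simp [List.getD_eq_getElem?_getD]

theorem pySetD_cellA {ts : List Int} {u : Int} (hl : ts.length = 1001)
    (h1 : -1001 ≤ u) (h2 : u ≤ 1000) (v : Int) :
    PySem.List.pySetD ts u v = ts.set (cellA u) v := by
  unfold PySem.List.pySetD PySem.List.pySet?
  rw [hl, pyIdx?_1001 h1 h2]
  rfl

theorem getD_set_cellA {ts : List Int} {u v : Int} (hl : ts.length = 1001)
    (hu1 : -1001 ≤ u) (hu2 : u ≤ 1000) (x d : Int) :
    (ts.set (cellA v) x).getD (cellA u) d =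
      if cellA u = cellA v then x else ts.getD (cellA u) d := by
  rw [List.getD_eq_getElem?_getD, List.getElem?_set]
  split
  · next h =>
    rw [if_pos h.symm]
    rw [if_pos (by rw [h, hl]; exact cellA_lt hu1 hu2)]
    rfl
  · next h =>
    rw [if_neg (fun hh => h hh.symm), List.getD_eq_getElem?_getD]

-- A's loop invariant
theorem AInv (l : List (Int × Bool)) :
    ∀ (ts : List Int) (ws : PySem.Set Int),
    ts.length = 1001 → ws.Nodup →
    (∀ p ∈ l, -1001 ≤ p.1 ∧ p.1 ≤ 1000) →
    (foldA l (ts, ws)).1.length = 1001 ∧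
    (foldA l (ts, ws)).2.Nodup ∧
    (∀ u, u ∈ (foldA l (ts, ws)).2 ↔ u ∈ ws ∨ (u, true) ∈ l) ∧
    (∀ u, -1001 ≤ u → u ≤ 1000 →
       (∀ p ∈ l, p.1 ≠ u → cellA p.1 ≠ cellA u) →
       PySem.List.pyGetD (foldA l (ts, ws)).1 u 0 =
         PySem.List.pyGetD ts u 0 + (if u ∈ ws then 0 else cntA u l)) := by
  induction l with
  | nil =>
    intro ts ws hts hws _
    refine ⟨hts, hws, fun u => by simp [foldA], fun u _ _ _ => ?_⟩
    simp only [foldA, List.foldl_nil, cntA]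
    split <;> ring
  | cons p t ih =>
    intro ts ws hts hws hpre
    have hpr : -1001 ≤ p.1 ∧ p.1 ≤ 1000 := hpre p (List.mem_cons_self ..)
    have hpret : ∀ q ∈ t, -1001 ≤ q.1 ∧ q.1 ≤ 1000 :=
      fun q hq => hpre q (List.mem_cons_of_mem _ hq)
    have hfold : foldA (p :: t) (ts, ws) = foldA t (stepA (ts, ws) p) := rfl
    by_cases hc : p.1 ∈ ws
    · -- user already a winner: state unchanged
      have hstep : stepA (ts, ws) p = (ts, ws) := by simp [stepA, hc]
      rw [hfold, hstep]
      obtain ⟨h1, h2, h3, h4⟩ := ih ts ws hts hws hpret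
      refine ⟨h1, h2, fun u => ?_, fun u hu1 hu2 hexcl => ?_⟩
      · rw [h3 u]
        constructor
        · rintro (h | h)
          · exact Or.inl h
          · exact Or.inr (List.mem_cons_of_mem _ h)
        · rintro (h | h)
          · exact Or.inl h
          · rcases List.mem_cons.mp h with h | h
            · exact Or.inl (by rw [← h] at hc; exact hc)
            · exact Or.inr h
      · rw [h4 u hu1 hu2 (fun q hq hne => hexcl q (List.mem_cons_of_mem _ hq) hne)]
        by_cases hu : u ∈ ws
        · simp [hu]
        · have hpu : p.1 ≠ u := fun h => hu (h ▸ hc)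
          simp [hu, cntA, hpu]
    · -- fresh user: tries[user] += 1, maybe added to winners
      have hset : PySem.List.pySetD ts p.1 (PySem.List.pyGetD ts p.1 0 + 1) =
          ts.set (cellA p.1) (PySem.List.pyGetD ts p.1 0 + 1) :=
        pySetD_cellA hts hpr.1 hpr.2 _
      have hts1 : (ts.set (cellA p.1) (PySem.List.pyGetD ts p.1 0 + 1)).length = 1001 := by
        simp [hts]
      -- the updated tries read back at cell u
      have hread : ∀ u, -1001 ≤ u → u ≤ 1000 → cellA u ≠ cellA p.1 →
          PySem.List.pyGetD (ts.set (cellA p.1) (PySem.List.pyGetD ts p.1 0 + 1)) u 0 =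
            PySem.List.pyGetD ts u 0 := by
        intro u hu1 hu2 hne
        rw [pyGetD_cellA hts1 hu1 hu2, getD_set_cellA hts hu1 hu2, if_neg hne,
          pyGetD_cellA hts hu1 hu2]
      have hreadp :
          PySem.List.pyGetD (ts.set (cellA p.1) (PySem.List.pyGetD ts p.1 0 + 1)) p.1 0 =
            PySem.List.pyGetD ts p.1 0 + 1 := by
        rw [pyGetD_cellA hts1 hpr.1 hpr.2, getD_set_cellA hts hpr.1 hpr.2, if_pos rfl]
      cases hb : p.2
      · -- no win: winners unchanged
        have hstep : stepA (ts, ws) p =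
            (ts.set (cellA p.1) (PySem.List.pyGetD ts p.1 0 + 1), ws) := by
          simp [stepA, hc, hb, hset]
        rw [hfold, hstep]
        obtain ⟨h1, h2, h3, h4⟩ := ih _ ws hts1 hws hpret
        refine ⟨h1, h2, fun u => ?_, fun u hu1 hu2 hexcl => ?_⟩
        · rw [h3 u]
          have hp : p = (p.1, false) := by rw [← hb]
          constructor
          · rintro (h | h)
            · exact Or.inl h
            · exact Or.inr (List.mem_cons_of_mem _ h)
          · rintro (h | h)
            · exact Or.inl h
            · rcases List.mem_cons.mp h with h | h
              · rw [hp] at h; simp at h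
              · exact Or.inr h
        · rw [h4 u hu1 hu2 (fun q hq hne => hexcl q (List.mem_cons_of_mem _ hq) hne)]
          by_cases hup : p.1 = u
          · subst hup
            rw [hreadp, if_neg hc, if_neg hc]
            have : cntA p.1 (p :: t) = 1 + cntA p.1 t := by simp [cntA, hb]
            rw [this]
            ring
          · rw [hread u hu1 hu2 (fun h => hexcl p (List.mem_cons_self ..) hup h.symm)]
            have : cntA u (p :: t) = cntA u t := by simp [cntA, hup]
            rw [this]
      · -- win: user appended to winners
        have hstep : stepA (ts, ws) p =
            (ts.set (cellA p.1) (PySem.List.pyGetD ts p.1 0 + 1), PySem.Set.add ws p.1) := by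
          simp [stepA, hc, hb, hset]
        rw [hfold, hstep]
        obtain ⟨h1, h2, h3, h4⟩ := ih _ (PySem.Set.add ws p.1) hts1
          (PySem.Set.nodup_add ws p.1 hws) hpret
        refine ⟨h1, h2, fun u => ?_, fun u hu1 hu2 hexcl => ?_⟩
        · rw [h3 u]
          have hp : p = (p.1, true) := by rw [← hb]
          rw [PySem.Set.mem_add]
          constructor
          · rintro ((h | h) | h)
            · exact Or.inl h
            · exact Or.inr (by rw [hp, h]; exact List.mem_cons_self ..)
            · exact Or.inr (List.mem_cons_of_mem _ h)
          · rintro (h | h)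
            · exact Or.inl (Or.inl h)
            · rcases List.mem_cons.mp h with h | h
              · exact Or.inl (Or.inr (by rw [hp] at h; exact (Prod.mk.injEq .. ▸ h).1.symm ▸ rfl))
              · exact Or.inr h
        · rw [h4 u hu1 hu2 (fun q hq hne => hexcl q (List.mem_cons_of_mem _ hq) hne)]
          by_cases hup : p.1 = u
          · subst hup
            rw [hreadp]
            have hmem : p.1 ∈ PySem.Set.add ws p.1 := (PySem.Set.mem_add ws p.1 p.1).mpr (Or.inr rfl)
            rw [if_pos hmem, if_neg hc]
            have : cntA p.1 (p :: t) = 1 := by simp [cntA, hb]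
            rw [this]
            ring
          · rw [hread u hu1 hu2 (fun h => hexcl p (List.mem_cons_self ..) hup h.symm)]
            have h5 : cntA u (p :: t) = cntA u t := by simp [cntA, hup]
            have h6 : (u ∈ PySem.Set.add ws p.1) ↔ u ∈ ws := by
              rw [PySem.Set.mem_add]
              exact ⟨fun h => h.resolve_right (fun h => hup h.symm), Or.inl⟩
            rw [h5]
            by_cases hu : u ∈ ws
            · simp [hu, h6.mpr hu]
            · rw [if_neg hu, if_neg (fun h => hu (h6.mp h))]

-- firstWinIdx on u's flag list computes u's tries-until-first-win
theorem firstWinIdx_flagsB (u : Int) (l : List (Int × Bool)) :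
    ∀ i : Int, firstWinIdx (flagsB u l) i =
      (if (u, true) ∈ l then some (i + cntA u l) else none) := by
  induction l with
  | nil => intro i; simp [flagsB, firstWinIdx]
  | cons p t ih =>
    intro i
    by_cases hp : p.1 = u
    · have hfl : flagsB u (p :: t) = p.2 :: flagsB u t := by
        simp [flagsB, hp]
      rw [hfl]
      cases hb : p.2
      · have hm : ((u, true) ∈ p :: t) ↔ (u, true) ∈ t := by
          rw [List.mem_cons]
          constructor
          · rintro (h | h)
            · rw [← h] at hb; simp at hb
            · exact h
          · exact Or.inr
        have hcnt : cntA u (p :: t) = 1 + cntA u t := by simp [cntA, hp, hb]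
        have hstep : firstWinIdx (false :: flagsB u t) i = firstWinIdx (flagsB u t) (i + 1) := by
          simp [firstWinIdx]
        rw [hstep, ih (i + 1), hcnt]
        by_cases hmem : (u, true) ∈ t
        · rw [if_pos hmem, if_pos (hm.mpr hmem)]
          congr 1
          ring
        · rw [if_neg hmem, if_neg (fun h => hmem (hm.mp h))]
      · have hpe : p = (u, true) := by
          rw [← hp, ← hb]
        have hcnt : cntA u (p :: t) = 1 := by simp [cntA, hp, hb]
        have hmem : (u, true) ∈ p :: t := by rw [hpe]; exact List.mem_cons_self ..
        rw [if_pos hmem, hcnt]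
        simp [firstWinIdx]
    · have hfl : flagsB u (p :: t) = flagsB u t := by
        simp [flagsB, hp]
      have hm : ((u, true) ∈ p :: t) ↔ (u, true) ∈ t := by
        rw [List.mem_cons]
        constructor
        · rintro (h | h)
          · rw [← h] at hp; simp at hp
          · exact h
        · exact Or.inr
      have hcnt : cntA u (p :: t) = cntA u t := by simp [cntA, hp]
      rw [hfl, ih i, hcnt]
      by_cases hmem : (u, true) ∈ t
      · rw [if_pos hmem, if_pos (hm.mpr hmem)]
      · rw [if_neg hmem, if_neg (fun h => hmem (hm.mp h))]

theorem values_eq_map_getD {κ ν : Type} [BEq κ] [LawfulBEq κ]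
    (d : PySem.Dict κ ν) (d0 : ν) (h : d.keys.Nodup) :
    PySem.Dict.values d = d.keys.map (fun k => d.getD k d0) := by
  show List.map (fun x => x.2) d.items = (List.map (fun x => x.1) d.items).map _
  rw [List.map_map]
  apply List.map_congr_left
  intro p hp
  exact (PySem.Dict.getD_of_mem_items d (show (p.1, p.2) ∈ d.items by simpa using hp) h d0).symm

theorem flatMap_ite_singleton {α β : Type} (P : α → Prop) [DecidablePred P]
    (g : α → β) (xs : List α) :
    xs.flatMap (fun u => if P u then [g u] else []) =
      (xs.filter (fun u => decide (P u))).map g := by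
  induction xs with
  | nil => simp
  | cons a t ih =>
    simp only [List.flatMap_cons, List.filter_cons]
    by_cases h : P a
    · simp [h, ih]
    · simp [h, ih]

-- B's closed form
set_option maxRecDepth 4096 in
theorem solution_alt_char (l : List (Int × Bool)) :
    solution_alt l =
      (let C := ((PySem.Set.ofList (l.map (fun p => p.1))).filter
          (fun u => decide ((u, true) ∈ l))).map (fun u => cntA u l)
       if C = [] then 0 else PySem.Int.floordiv C.sum (C.length : Int)) := by
  have hkeys : (l.foldl
      (fun (g : PySem.Dict Int (List Bool)) (p : Int × Bool) =>
        g.modify p.1 [] (fun fs => fs ++ [p.2])) PySem.Dict.empty).keys =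
      PySem.Set.ofList (l.map (fun p => p.1)) := by
    rw [PySem.Dict.keys_foldl_modify_key l (fun p : Int × Bool => p.1) ([] : List Bool)
      (fun _ p => (fun fs => fs ++ [p.2])) PySem.Dict.empty,
      PySem.Dict.keys_empty, PySem.Set.update_nil_left]
  have hnod : (l.foldl
      (fun (g : PySem.Dict Int (List Bool)) (p : Int × Bool) =>
        g.modify p.1 [] (fun fs => fs ++ [p.2])) PySem.Dict.empty).keys.Nodup := by
    rw [hkeys]; exact PySem.Set.nodup_ofList _
  have hgetD : ∀ u, (l.foldl
      (fun (g : PySem.Dict Int (List Bool)) (p : Int × Bool) =>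
        g.modify p.1 [] (fun fs => fs ++ [p.2])) PySem.Dict.empty).getD u [] = flagsB u l := by
    intro u
    rw [PySem.Dict.getD_foldl_modify_append l PySem.Dict.empty u, PySem.Dict.getD_empty]
    rfl
  show (if _ = _ then _ else _) = _
  rw [values_eq_map_getD _ ([] : List Bool) hnod, hkeys]
  have hfold : ∀ (vs : List (List Bool)),
      vs.foldl (fun (acc : List Int) fs =>
        match firstWinIdx fs 0 with
        | some c => acc ++ [c]
        | none => acc) [] =
      vs.flatMap (fun fs =>
        match firstWinIdx fs 0 with
        | some c => [c]
        | none => []) := by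
    intro vs
    have : (fun (acc : List Int) fs =>
        match firstWinIdx fs 0 with
        | some c => acc ++ [c]
        | none => acc) = (fun acc fs => acc ++
          (match firstWinIdx fs 0 with
           | some c => [c]
           | none => [])) := by
      funext acc fs
      cases firstWinIdx fs 0 <;> simp
    rw [this, PySem.List.foldl_append_eq_flatMap]
    simp
  rw [hfold, List.flatMap_map]
  have hbody : (fun u => (match firstWinIdx ((l.foldl
      (fun (g : PySem.Dict Int (List Bool)) (p : Int × Bool) =>
        g.modify p.1 [] (fun fs => fs ++ [p.2])) PySem.Dict.empty).getD u []) 0 with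
      | some c => [c]
      | none => ([] : List Int))) =
      (fun u => if (u, true) ∈ l then [cntA u l] else []) := by
    funext u
    rw [hgetD u, firstWinIdx_flagsB u l 0]
    by_cases hmem : (u, true) ∈ l
    · simp [hmem]
    · simp [hmem]
  rw [hbody, flatMap_ite_singleton (fun u => (u, true) ∈ l) (fun u => cntA u l)]

-- ===== VERDICT (by name: the statement is the Claim_ definition above) =====
theorem solution_spec : Claim_equal_solution := by
  intro l _ hprefull
  obtain ⟨hpre, hnd⟩ := hprefull
  show solution l = solution_alt l
  rw [solution_eq_foldA, solution_alt_char]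
  obtain ⟨hlen, hnodW, hmem, hval⟩ := AInv l (List.replicate 1001 0) PySem.Set.empty
    (by rw [List.length_replicate]) List.nodup_nil hpre
  set W := (foldA l (List.replicate 1001 (0 : Int), PySem.Set.empty)).2 with hWdef
  set T := (foldA l (List.replicate 1001 (0 : Int), PySem.Set.empty)).1 with hTdef
  have hmemW : ∀ u, u ∈ W ↔ (u, true) ∈ l := by
    intro u
    rw [hmem u]
    simp [PySem.Set.empty]
  -- each winner's final tries cell holds its tries-until-first-win
  have hW : ∀ w ∈ W, PySem.List.pyGetD T w 0 = cntA w l := by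
    intro w hw
    have hwt : (w, true) ∈ l := (hmemW w).mp hw
    have hwr := hpre (w, true) hwt
    have hexcl : ∀ p ∈ l, p.1 ≠ w → cellA p.1 ≠ cellA w := by
      intro p hp hne hcell
      rcases cellA_inj (hpre p hp).1 (hpre p hp).2 hwr.1 hwr.2 hcell with h | h | h
      · exact hne h
      · -- p.1 = w + 1001 : the pair (w, w + 1001) with winner w
        exact hnd ⟨(w, true), hwt, ⟨p, hp, by simpa using h⟩, Or.inl (by simpa using hwt)⟩
      · -- w = p.1 + 1001 : the pair (p.1, w) with winner w
        exact hnd ⟨p, hp, ⟨(w, true), hwt, by simpa using h⟩, Or.inr (by rw [← h]; exact hwt)⟩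
    have h0 : PySem.List.pyGetD (List.replicate 1001 (0 : Int)) w 0 = 0 := by
      apply List.eq_of_mem_replicate (n := 1001) (a := (0 : Int))
      apply PySem.List.pyGetD_mem
      rw [List.length_replicate]
      constructor <;> push_cast <;> omega
    have := hval w hwr.1 hwr.2 hexcl
    rw [h0] at this
    simpa [PySem.Set.empty] using this
  -- B's winner list: same members, no duplicates → a permutation of W
  have hnodB : (((PySem.Set.ofList (l.map (fun p => p.1)))).filter
      (fun u => decide ((u, true) ∈ l))).Nodup :=
    (PySem.Set.nodup_ofList _).filter _
  have hmemB : ∀ u, u ∈ ((PySem.Set.ofList (l.map (fun p => p.1))).filter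
      (fun u => decide ((u, true) ∈ l))) ↔ (u, true) ∈ l := by
    intro u
    rw [List.mem_filter]
    constructor
    · rintro ⟨_, h⟩; exact of_decide_eq_true h
    · intro h
      refine ⟨(PySem.Set.mem_ofList _ _).mpr ?_, decide_eq_true h⟩
      exact List.mem_map.mpr ⟨(u, true), h, rfl⟩
  have hperm : W.Perm ((PySem.Set.ofList (l.map (fun p => p.1))).filter
      (fun u => decide ((u, true) ∈ l))) :=
    (List.perm_ext_iff_of_nodup hnodW hnodB).mpr
      (fun a => (hmemW a).trans ((hmemB a).symm))
  have hpermC : (W.map (fun u => cntA u l)).Perm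
      (((PySem.Set.ofList (l.map (fun p => p.1))).filter
        (fun u => decide ((u, true) ∈ l))).map (fun u => cntA u l)) := hperm.map _
  have hsum : (W.foldl (fun tot w => tot + PySem.List.pyGetD T w 0) 0) =
      (((PySem.Set.ofList (l.map (fun p => p.1))).filter
        (fun u => decide ((u, true) ∈ l))).map (fun u => cntA u l)).sum := by
    rw [PySem.List.foldl_add W (fun w => PySem.List.pyGetD T w 0) 0,
      List.map_congr_left hW, zero_add]
    exact hpermC.sum_eq
  have hlenW : W.length = (((PySem.Set.ofList (l.map (fun p => p.1))).filter
      (fun u => decide ((u, true) ∈ l))).map (fun u => cntA u l)).length := by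
    rw [List.length_map]
    exact hperm.length_eq
  by_cases hWnil : W = []
  · have : (((PySem.Set.ofList (l.map (fun p => p.1))).filter
        (fun u => decide ((u, true) ∈ l))).map (fun u => cntA u l)) = [] := by
      apply List.eq_nil_of_length_eq_zero
      rw [← hlenW, hWnil]
      rfl
    rw [hWnil, this]
    simp
  · have : ¬ (((PySem.Set.ofList (l.map (fun p => p.1))).filter
        (fun u => decide ((u, true) ∈ l))).map (fun u => cntA u l)) = [] := by
      intro h
      apply hWnil
      apply List.eq_nil_of_length_eq_zero
      rw [hlenW, h]
      rfl
    rw [if_neg hWnil, if_neg this, hsum, hlenW]
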